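-- pv_equiv track=rewrite | github.com/nguyenlinhlinh/adventofcode-2024 | 22/solution1.py | generateSecretNbrs
-- ===== SOURCE A (Python) =====
-- def getNextSecretNbr(secretNbr):
--     bigNbr = 16777216
--     x = ((secretNbr * 64)^secretNbr) % bigNbr
--     y = ((x // 32) ^ x) % bigNbr
--     z = ((y * 2048) ^ y) % bigNbr
--     return z
--
-- def generateSecretNbrs(secretNbrs, times):
--     result = {}
--     for nbr in secretNbrs:
--         result[nbr] = nbr
--     for i in range(times):
--         for initialSecretNbr, secretNbr in result.items():
--             result[initialSecretNbr] = getNextSecretNbr(secretNbr)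
--     return result
-- ===== SOURCE B (Python) =====
-- def _step(s):
--     m = 16777216
--     x = ((s * 64) ^ s) % m
--     y = ((x // 32) ^ x) % m
--     z = ((y * 2048) ^ y) % m
--     return z
--
-- def generateSecretNbrs(secretNbrs, times):
--     result = {}
--     for nbr in secretNbrs:
--         if nbr not in result:
--             s = nbr
--             for _ in range(times):
--                 s = _step(s)
--             result[nbr] = s
--     return result
-- ===== Notes on version B (the rewrite author's own statement) =====
-- stated objective: simpler
-- what changed: B evolves each distinct input number to completion with a per-number inner loop (depth-first), instead of A's breadth-first lockstep update of a shared dict over `times` outer passes; the dict is built once, with duplicates skipped rather than overwritten.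
import Mathlib
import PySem

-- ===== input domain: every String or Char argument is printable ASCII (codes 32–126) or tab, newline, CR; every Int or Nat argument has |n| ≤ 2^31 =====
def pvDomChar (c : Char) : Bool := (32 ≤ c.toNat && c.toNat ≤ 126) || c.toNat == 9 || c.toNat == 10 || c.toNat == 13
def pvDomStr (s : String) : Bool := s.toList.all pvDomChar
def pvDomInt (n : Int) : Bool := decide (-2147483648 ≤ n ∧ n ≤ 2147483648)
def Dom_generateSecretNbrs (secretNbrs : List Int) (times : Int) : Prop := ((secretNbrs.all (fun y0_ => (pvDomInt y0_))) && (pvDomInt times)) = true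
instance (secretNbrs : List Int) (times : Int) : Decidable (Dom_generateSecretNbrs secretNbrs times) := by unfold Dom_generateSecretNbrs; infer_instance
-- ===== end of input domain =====

-- B evolves each distinct input number to completion with a per-number inner loop, instead of
-- A's lockstep per-step update of a shared dict; objective: simpler decomposition, same cost.


-- ===== PORT A =====
def getNextSecretNbr (secretNbr : Int) : Int :=
  let bigNbr : Int := 16777216
  let x := PySem.Int.mod (PySem.Int.bxor (secretNbr * 64) secretNbr) bigNbr
  let y := PySem.Int.mod (PySem.Int.bxor (PySem.Int.floordiv x 32) x) bigNbr
  let z := PySem.Int.mod (PySem.Int.bxor (y * 2048) y) bigNbr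
  z

def generateSecretNbrs (secretNbrs : List Int) (times : Int) : List (Int × Int) :=
  let result : PySem.Dict Int Int :=
    secretNbrs.foldl (fun d nbr => d.insert nbr nbr) PySem.Dict.empty
  let result :=
    (PySem.List.pyRange 0 times 1).foldl
      (fun r _ => r.items.foldl (fun r' p => r'.insert p.1 (getNextSecretNbr p.2)) r) result
  result.items

-- ===== PORT B =====
def stepAlt (s : Int) : Int :=
  let m : Int := 16777216
  let x := PySem.Int.mod (PySem.Int.bxor (s * 64) s) m
  let y := PySem.Int.mod (PySem.Int.bxor (PySem.Int.floordiv x 32) x) m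
  let z := PySem.Int.mod (PySem.Int.bxor (y * 2048) y) m
  z

def evolveAlt : Nat → Int → Int
  | 0, s => s
  | n + 1, s => evolveAlt n (stepAlt s)

def generateSecretNbrs_alt (secretNbrs : List Int) (times : Int) : List (Int × Int) :=
  secretNbrs.foldl
    (fun acc nbr =>
      if acc.any (fun p => p.1 == nbr) then acc
      else acc ++ [(nbr, evolveAlt times.toNat nbr)]) []

-- ===== PRECONDITION & SPEC =====
def Spec_generateSecretNbrs (secretNbrs : List Int) (times : Int) (out : List (Int × Int)) : Prop := out = generateSecretNbrs_alt secretNbrs times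
instance (secretNbrs : List Int) (times : Int) (out : List (Int × Int)) : Decidable (Spec_generateSecretNbrs secretNbrs times out) := by unfold Spec_generateSecretNbrs; infer_instance

-- ===== CLAIM (what is proved, stated in full; the proofs are below) =====
def Claim_equal_generateSecretNbrs : Prop := ∀ (secretNbrs : List Int) (times : Int), Dom_generateSecretNbrs secretNbrs times → Spec_generateSecretNbrs secretNbrs times (generateSecretNbrs secretNbrs times)

-- ===== LEMMAS AND PROOFS =====

-- one pass of A's inner per-item fold over a dict whose items are ks.map (k, v k),
-- with an already-processed prefix `pre`
theorem step_gen (ks : List Int) (v : Int → Int) (pre : List (Int × Int))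
    (h : (pre.map Prod.fst ++ ks).Nodup) :
    ((ks.map (fun k => (k, v k))).foldl
        (fun d p => d.insert p.1 (getNextSecretNbr p.2))
        (PySem.Dict.mk (pre ++ ks.map (fun k => (k, v k))))).items
      = pre ++ ks.map (fun k => (k, getNextSecretNbr (v k))) := by
  induction ks generalizing pre with
  | nil => simp
  | cons k ks ih =>
    rcases List.nodup_append.mp h with ⟨hpre, hcons, hdisj⟩
    have hk_ks : k ∉ ks := (List.nodup_cons.mp hcons).1
    have hk_pre : k ∉ pre.map Prod.fst := fun hm => hdisj k hm k (List.mem_cons_self ..) rfl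
    have hc : (PySem.Dict.mk (pre ++ (k, v k) :: ks.map (fun j => (j, v j)))).contains k = true := by
      simp [PySem.Dict.contains_mk]
    have hins : (PySem.Dict.mk (pre ++ (k, v k) :: ks.map (fun j => (j, v j)))).insert k
          (getNextSecretNbr (v k))
        = PySem.Dict.mk (pre ++ (k, getNextSecretNbr (v k)) :: ks.map (fun j => (j, v j))) := by
      apply PySem.Dict.ext
      rw [PySem.Dict.items_insert_of_contains _ _ hc]
      show (pre ++ (k, v k) :: ks.map (fun j => (j, v j))).map
          (fun p => if (p.1 == k) = true then (k, getNextSecretNbr (v k)) else p) = _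
      rw [List.map_append, List.map_cons, List.map_map]
      congr 1
      · calc pre.map (fun p => if (p.1 == k) = true then (k, getNextSecretNbr (v k)) else p)
            = pre.map id := by
              apply List.map_congr_left
              intro p hp
              have hne : p.1 ≠ k := fun e => hk_pre (e ▸ List.mem_map_of_mem hp)
              simp [hne]
          _ = pre := List.map_id pre
      · congr 1
        · simp
        · apply List.map_congr_left
          intro j hj
          have hne : j ≠ k := fun e => hk_ks (e ▸ hj)
          simp [hne]
    simp only [List.map_cons, List.foldl_cons, hins]
    have hre : pre ++ (k, getNextSecretNbr (v k)) :: ks.map (fun j => (j, v j))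
        = (pre ++ [(k, getNextSecretNbr (v k))]) ++ ks.map (fun j => (j, v j)) := by
      simp
    have hnd : ((pre ++ [(k, getNextSecretNbr (v k))]).map Prod.fst ++ ks).Nodup := by
      simp only [List.map_append, List.map_cons, List.map_nil]
      simpa [List.append_assoc] using h
    rw [hre, ih _ hnd]
    simp

theorem A_fold (L : List Int) (ks : List Int) (v : Int → Int) (h : ks.Nodup) :
    (L.foldl
        (fun r _ => r.items.foldl (fun r' p => r'.insert p.1 (getNextSecretNbr p.2)) r)
        (PySem.Dict.mk (ks.map (fun k => (k, v k))))).items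
      = ks.map (fun k => (k, evolveAlt L.length (v k))) := by
  induction L generalizing v with
  | nil => simp [evolveAlt]
  | cons a L ih =>
    have hstep :
        ((PySem.Dict.mk (ks.map (fun k => (k, v k)))).items.foldl
            (fun r' p => r'.insert p.1 (getNextSecretNbr p.2))
            (PySem.Dict.mk (ks.map (fun k => (k, v k)))))
          = PySem.Dict.mk (ks.map (fun k => (k, getNextSecretNbr (v k)))) := by
      apply PySem.Dict.ext
      have := step_gen ks v [] (by simpa using h)
      simpa using this
    simp only [List.foldl_cons, hstep]
    rw [ih (fun k => getNextSecretNbr (v k))]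
    apply List.map_congr_left
    intro k _
    rfl

theorem d0_eq (l : List Int) (ks : List Int) :
    (l.foldl (fun d n => d.insert n n) (PySem.Dict.mk (ks.map (fun k => (k, k)))))
      = PySem.Dict.mk ((PySem.Set.update ks l).map (fun k => (k, k))) := by
  induction l generalizing ks with
  | nil => simp [PySem.Set.update]
  | cons n l ih =>
    by_cases h : n ∈ ks
    · have hc : (PySem.Dict.mk (ks.map (fun k => (k, k)))).contains n = true := by
        simp [PySem.Dict.contains_mk, List.any_map]; exact h
      have hins : (PySem.Dict.mk (ks.map (fun k => (k, k)))).insert n n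
          = PySem.Dict.mk (ks.map (fun k => (k, k))) := by
        apply PySem.Dict.ext
        rw [PySem.Dict.items_insert_of_contains _ _ hc]
        show (ks.map (fun k => (k, k))).map _ = ks.map (fun k => (k, k))
        rw [List.map_map]
        apply List.map_congr_left
        intro k _
        by_cases hk : k = n <;> simp [hk]
      simp only [List.foldl_cons, hins, PySem.Set.update_cons, PySem.Set.add_of_mem h]
      exact ih ks
    · have hc : (PySem.Dict.mk (ks.map (fun k => (k, k)))).contains n = false := by
        simp [PySem.Dict.contains_mk, List.any_map]
        intro x hx; exact fun e => absurd (e ▸ hx) h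
      have hins : (PySem.Dict.mk (ks.map (fun k => (k, k)))).insert n n
          = PySem.Dict.mk ((ks ++ [n]).map (fun k => (k, k))) := by
        apply PySem.Dict.ext
        rw [PySem.Dict.items_insert_of_not_contains _ _ hc]
        simp
      simp only [List.foldl_cons, hins, PySem.Set.update_cons, PySem.Set.add_of_not_mem h]
      exact ih (ks ++ [n])

theorem B_fold (l ks : List Int) (T : Nat) :
    (l.foldl
        (fun acc nbr =>
          if acc.any (fun p => p.1 == nbr) then acc
          else acc ++ [(nbr, evolveAlt T nbr)])
        (ks.map (fun k => (k, evolveAlt T k))))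
      = (PySem.Set.update ks l).map (fun k => (k, evolveAlt T k)) := by
  induction l generalizing ks with
  | nil => simp [PySem.Set.update]
  | cons n l ih =>
    by_cases h : n ∈ ks
    · have hany : (ks.map (fun k => (k, evolveAlt T k))).any (fun p => p.1 == n) = true := by
        simp [List.any_map]
        exact h
      simp only [List.foldl_cons, hany, if_true, PySem.Set.update_cons, PySem.Set.add_of_mem h]
      exact ih ks
    · have hany : (ks.map (fun k => (k, evolveAlt T k))).any (fun p => p.1 == n) = false := by
        simp [List.any_map]
        intro x hx; exact fun e => absurd (e ▸ hx) h
      simp only [List.foldl_cons, hany, PySem.Set.update_cons, PySem.Set.add_of_not_mem h]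
      have : ks.map (fun k => (k, evolveAlt T k)) ++ [(n, evolveAlt T n)]
          = (ks ++ [n]).map (fun k => (k, evolveAlt T k)) := by simp
      rw [this]; exact ih (ks ++ [n])

-- ===== VERDICT (by name: the statement is the Claim_ definition above) =====
theorem generateSecretNbrs_spec : Claim_equal_generateSecretNbrs := by
  intro l t _
  unfold Spec_generateSecretNbrs generateSecretNbrs generateSecretNbrs_alt
  show ((PySem.List.pyRange 0 t 1).foldl
      (fun r _ => r.items.foldl (fun r' p => r'.insert p.1 (getNextSecretNbr p.2)) r)
      (l.foldl (fun d nbr => d.insert nbr nbr) PySem.Dict.empty)).items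
    = l.foldl
        (fun acc nbr =>
          if acc.any (fun p => p.1 == nbr) then acc
          else acc ++ [(nbr, evolveAlt t.toNat nbr)]) []
  have hB := B_fold l [] t.toNat
  simp only [List.map_nil] at hB
  rw [hB]
  have hd0 := d0_eq l []
  simp only [List.map_nil] at hd0
  have hempty : (PySem.Dict.empty : PySem.Dict Int Int) = PySem.Dict.mk [] := rfl
  rw [hempty, hd0]
  have hA := A_fold (PySem.List.pyRange 0 t 1) (PySem.Set.update [] l) (fun k => k)
    (by rw [PySem.Set.update_nil_left]; exact PySem.Set.nodup_ofList l)
  simp only [] at hA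
  rw [hA]
  simp [PySem.List.length_pyRange_one]
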